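-- pv_equiv track=rewrite | github.com/SidorencuOanaAlexandra/Artificial-Intelligence | main.py | create_matrix_f
-- ===== SOURCE A (Python) =====
-- def create_matrix_f(N):
--     matrix_f =[]
--     for i in range(N):
--         l=[]
--         for j in range(N):
--             if i!=j:
--                 l.append(1)
--             else:
--
--                 l.append(0)
--         matrix_f.append(l)
--
--     return matrix_f
-- ===== SOURCE B (Python) =====
-- def create_matrix_f(N):
--     if N <= 0:
--         return []
--     row = [0] + [1] * (N - 1)
--     matrix_f = []
--     for _ in range(N):
--         matrix_f.append(row)
--         row = [row[-1]] + row[:-1]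
--     return matrix_f
-- ===== Notes on version B (the rewrite author's own statement) =====
-- stated objective: alternative
-- what changed: B generates the matrix by cyclic rotation: it builds the first row [0]+[1]*(N-1) once and derives every subsequent row by rotating the previous row right by one ([row[-1]]+row[:-1]), instead of filling each cell with a per-cell i!=j comparison.
import Mathlib
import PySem

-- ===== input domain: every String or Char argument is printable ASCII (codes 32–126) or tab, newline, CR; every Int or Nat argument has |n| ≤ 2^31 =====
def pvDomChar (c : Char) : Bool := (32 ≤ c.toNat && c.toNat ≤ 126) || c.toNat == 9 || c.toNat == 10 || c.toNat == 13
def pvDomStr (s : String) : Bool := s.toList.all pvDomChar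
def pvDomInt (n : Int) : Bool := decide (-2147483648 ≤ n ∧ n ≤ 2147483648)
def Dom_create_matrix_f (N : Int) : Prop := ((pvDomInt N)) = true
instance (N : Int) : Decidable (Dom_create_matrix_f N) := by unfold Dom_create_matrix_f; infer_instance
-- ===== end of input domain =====

-- B builds the first row once and derives each next row by rotating the previous one
-- right by one position, instead of per-cell i!=j tests (alternative algorithm;
-- return-value equivalence).
-- ===== PORT A =====
def create_matrix_f (N : Int) : List (List Int) :=
  (PySem.List.pyRange 0 N 1).foldl
    (fun matrix_f i =>
      matrix_f ++ [(PySem.List.pyRange 0 N 1).foldl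
        (fun l j => if i ≠ j then l ++ [(1 : Int)] else l ++ [(0 : Int)]) []])
    []

-- ===== PORT B =====
-- [row[-1]] + row[:-1]; the pyGetD default 0 is never used: the row is nonempty for N ≥ 1.
def create_matrix_f_alt (N : Int) : List (List Int) :=
  if N ≤ 0 then []
  else
    ((PySem.List.pyRange 0 N 1).foldl
      (fun (st : List (List Int) × List Int) _ =>
        (st.1 ++ [st.2],
         PySem.List.pyGetD st.2 (-1) 0 :: PySem.List.slice st.2 none (some (-1))))
      ([], (0 : Int) :: List.replicate (N - 1).toNat (1 : Int))).1

-- ===== PRECONDITION & SPEC =====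
def Spec_create_matrix_f (N : Int) (out : List (List Int)) : Prop := out = create_matrix_f_alt N
instance (N : Int) (out : List (List Int)) : Decidable (Spec_create_matrix_f N out) := by unfold Spec_create_matrix_f; infer_instance

-- ===== CLAIM (what is proved, stated in full; the proofs are below) =====
def Claim_equal_create_matrix_f : Prop := ∀ (N : Int), Dom_create_matrix_f N → Spec_create_matrix_f N (create_matrix_f N)

-- ===== LEMMAS AND PROOFS =====

-- the row with a single zero at position j
def pvRowAt (n j : Nat) : List Int := (List.replicate n (1 : Int)).set j 0

theorem pvRowAt_length (n j : Nat) : (pvRowAt n j).length = n := by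
  simp [pvRowAt]

-- rotating rowAt j right by one gives rowAt (j+1), for j+1 < n
theorem pvRot_rowAt (n j : Nat) (h : j + 1 < n) :
    PySem.List.pyGetD (pvRowAt n j) (-1) 0 :: PySem.List.slice (pvRowAt n j) none (some (-1))
      = pvRowAt n (j + 1) := by
  rw [PySem.List.slice_to_neg_one]
  have hne : pvRowAt n j ≠ [] := by
    intro hc
    have := pvRowAt_length n j
    rw [hc] at this
    simp at this
    omega
  rw [PySem.List.pyGetD_neg_one _ _ hne]
  have hlast : (pvRowAt n j).getLast hne = 1 := by
    rw [List.getLast_eq_getElem]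
    simp only [pvRowAt, List.getElem_set, List.getElem_replicate]
    have : ¬ j = n - 1 := by omega
    simp [this]
  rw [hlast]
  apply List.ext_getElem
  · simp [pvRowAt]; omega
  · intro k hk1 hk2
    rcases Nat.eq_zero_or_pos k with hk0 | hkpos
    · subst hk0
      simp only [pvRowAt] at *
      simp only [List.getElem_cons_zero, List.getElem_set, List.getElem_replicate]
      simp
    · obtain ⟨m, rfl⟩ : ∃ m, k = m + 1 := ⟨k - 1, by omega⟩
      simp only [List.getElem_cons_succ, pvRowAt] at *
      rw [List.getElem_dropLast]
      simp only [List.getElem_set, List.getElem_replicate]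
      have : (j = m) ↔ (j + 1 = m + 1) := by omega
      by_cases hj : j = m
      · simp [hj]
      · simp [hj]

-- B's fold invariant: folding a list of length m starting at rowAt j appends rowAt j, …, rowAt (j+m-1)
theorem pvFold_inv (n : Nat) (L : List Int) (acc : List (List Int)) (j : Nat)
    (h : j + L.length ≤ n) :
    (L.foldl
      (fun (st : List (List Int) × List Int) _ =>
        (st.1 ++ [st.2],
         PySem.List.pyGetD st.2 (-1) 0 :: PySem.List.slice st.2 none (some (-1))))
      (acc, pvRowAt n j)).1
    = acc ++ (List.range L.length).map (fun t => pvRowAt n (j + t)) := by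
  induction L generalizing acc j with
  | nil => simp
  | cons x xs ih =>
    simp only [List.foldl_cons, List.length_cons] at *
    rcases Nat.lt_or_ge (j + 1) n with hlt | hge
    · rw [pvRot_rowAt n j hlt, ih (acc ++ [pvRowAt n j]) (j + 1) (by omega)]
      rw [List.range_succ_eq_map, List.map_cons, List.map_map, List.append_assoc,
        List.singleton_append]
      congr 2
      apply List.map_congr_left
      intro t _
      simp only [Function.comp_apply]
      congr 1
      omega
    · -- then xs = [] since j + 1 + xs.length ≤ n ≤ j + 1
      have hxs : xs = [] := by
        have := List.length_eq_zero_iff.mp (by omega : xs.length = 0)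
        exact this
      subst hxs
      simp

-- A's row i equals rowAt i
theorem pvA_row_eq (N i : Int) (h0 : 0 ≤ i) (_hN : i < N) :
    (PySem.List.pyRange 0 N 1).foldl
      (fun l j => if i ≠ j then l ++ [(1 : Int)] else l ++ [(0 : Int)]) []
    = pvRowAt N.toNat i.toNat := by
  have hshape : (PySem.List.pyRange 0 N 1).foldl
      (fun l j => if i ≠ j then l ++ [(1 : Int)] else l ++ [(0 : Int)]) []
      = (PySem.List.pyRange 0 N 1).map (fun j => if i ≠ j then (1 : Int) else 0) := by
    have hfun : (fun (l : List Int) (j : Int) => if i ≠ j then l ++ [(1 : Int)] else l ++ [(0 : Int)])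
        = fun l j => l ++ [if i ≠ j then (1 : Int) else 0] := by
      funext l j; by_cases hij : i = j <;> simp [hij]
    rw [hfun, PySem.List.foldl_append_singleton_eq_map, List.nil_append]
  rw [hshape]
  apply List.ext_getElem
  · simp [pvRowAt, PySem.List.length_pyRange_one]
  · intro k hk1 hk2
    simp only [List.getElem_map, PySem.List.getElem_pyRange_one, pvRowAt,
      List.getElem_set, List.getElem_replicate]
    have hkN : k < N.toNat := by
      simpa [PySem.List.length_pyRange_one] using hk1
    by_cases hik : i.toNat = k
    · have heq : i = (k : Int) := by omega
      simp [heq]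
    · have hne : i ≠ (k : Int) := by omega
      simp [hik, hne]

-- ===== VERDICT (by name: the statement is the Claim_ definition above) =====
theorem create_matrix_f_spec : Claim_equal_create_matrix_f := by
  intro N _
  unfold Spec_create_matrix_f create_matrix_f create_matrix_f_alt
  by_cases hN : N ≤ 0
  · simp only [hN, if_true]
    have : PySem.List.pyRange 0 N 1 = [] := by
      simp [PySem.List.pyRange]
      omega
    simp [this]
  · simp only [hN, if_false]
    have hrow0 : (0 : Int) :: List.replicate (N - 1).toNat (1 : Int) = pvRowAt N.toNat 0 := by
      apply List.ext_getElem
      · simp [pvRowAt]; omega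
      · intro k hk1 hk2
        rcases Nat.eq_zero_or_pos k with hk0 | hkpos
        · subst hk0; simp [pvRowAt]
        · obtain ⟨m, rfl⟩ : ∃ m, k = m + 1 := ⟨k - 1, by omega⟩
          simp only [List.getElem_cons_succ, List.getElem_replicate, pvRowAt,
            List.getElem_set, List.getElem_replicate]
          simp
    rw [hrow0, pvFold_inv N.toNat (PySem.List.pyRange 0 N 1) [] 0
      (by simp [PySem.List.length_pyRange_one])]
    rw [PySem.List.foldl_append_singleton_eq_map]
    simp only [List.nil_append, Nat.zero_add]
    apply List.ext_getElem
    · simp [PySem.List.length_pyRange_one]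
    · intro k hk1 hk2
      have hkN : k < N.toNat := by
        simpa [PySem.List.length_pyRange_one] using hk1
      simp only [List.getElem_map, PySem.List.getElem_pyRange_one, List.getElem_range,
        PySem.List.length_pyRange_one]
      rw [pvA_row_eq N ((0:Int) + k) (by omega) (by omega)]
      congr 1
      · omega
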